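-- pv_equiv track=rewrite | github.com/edarchis/advent2018 | day02/day02p2.py | common_section
-- ===== SOURCE A (Python) =====
-- def common_section(str1, str2):
--     # position of the single difference
--     diff_pos = -1
--     # would normally account for different string lengths if outside AoC
--     for i, char in enumerate(str1):
--         if char != str2[i]:
--             if diff_pos > -1:  # second difference, GTFO
--                 return None
--             diff_pos = i
--     if diff_pos > -1:
--         return str1[:diff_pos] + str1[diff_pos+1:]
--     else:
--         return None
-- ===== SOURCE B (Python) =====
-- def common_section(str1, str2):
--     # Two-phase approach: advance past the common prefix, then the remainder
--     # after skipping one char of str1 must equal the corresponding rest of str2.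
--     n = len(str1)
--     t = str2[:n]
--     m = len(t)
--     p = 0
--     while p < m and str1[p] == t[p]:
--         p += 1
--     if p < n and str1[p+1:] == t[p+1:]:
--         return str1[:p] + str1[p+1:]
--     return None
-- ===== Notes on version B (the rewrite author's own statement) =====
-- stated objective: alternative
-- what changed: B is a two-phase prefix/suffix decomposition: it advances a pointer past the longest common prefix of str1 and t = str2[:len(str1)], then decides with a single suffix equality test str1[p+1:] == t[p+1:], instead of A's full scan that threads a -1 sentinel and early-returns on a second mismatch.
import Mathlib
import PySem

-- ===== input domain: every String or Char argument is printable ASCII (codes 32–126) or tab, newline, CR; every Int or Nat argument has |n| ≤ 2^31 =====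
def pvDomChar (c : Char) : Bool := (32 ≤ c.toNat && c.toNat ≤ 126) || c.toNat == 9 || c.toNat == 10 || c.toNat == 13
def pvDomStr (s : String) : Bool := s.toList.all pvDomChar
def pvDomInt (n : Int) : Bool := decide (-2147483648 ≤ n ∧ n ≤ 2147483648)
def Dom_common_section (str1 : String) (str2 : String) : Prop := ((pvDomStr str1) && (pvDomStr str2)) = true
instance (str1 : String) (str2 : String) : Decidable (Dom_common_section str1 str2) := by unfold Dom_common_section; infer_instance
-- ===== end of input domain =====

-- B replaces A's sentinel-threading scan with a two-phase prefix/suffix decomposition: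
-- advance past the common prefix, then one suffix equality test decides (objective: alternative).

-- ===== PORT A =====
-- A's for-loop over enumerate(str1) threading the sentinel diff_pos, with both early returns.
def csLoopA (l2 l1 : List Char) : List (Int × Char) → Int → Option String
  | [], dp =>
      -- after the loop: if diff_pos > -1 return str1[:dp] + str1[dp+1:] else None
      if dp > -1 then
        some (String.ofList (PySem.List.slice l1 none (some dp) ++ PySem.List.slice l1 (some (dp + 1)) none))
      else none
  | (i, c) :: rest, dp =>
      match PySem.List.pyGet? l2 i with
      | none => none  -- str2[i] raises IndexError in Python; such inputs are outside Pre_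
      | some c2 =>
        if c ≠ c2 then
          if dp > -1 then none  -- second difference, GTFO
          else csLoopA l2 l1 rest i
        else csLoopA l2 l1 rest dp

def common_section (str1 : String) (str2 : String) : Option String :=
  csLoopA str2.toList str1.toList (PySem.List.enumerate str1.toList 0) (-1)

-- ===== PORT B =====
-- while p < m and str1[p] == t[p]: p += 1   (p < m ≤ len(str1), so both indexings are in
-- range; the loop runs at most m - p more times, so the fuel m - p makes it structural)
def csScanB (l1 t : List Char) : Nat → Nat → Nat
  | 0, p => p
  | fuel + 1, p => if p < t.length ∧ l1[p]? = t[p]? then csScanB l1 t fuel (p + 1) else p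

-- n = len(str1); t = str2[:n]; p = common-prefix scan; then one suffix equality test
def common_section_alt (str1 : String) (str2 : String) : Option String :=
  let l1 := str1.toList
  let n : Int := PySem.List.len l1
  let t := PySem.List.slice str2.toList none (some n)
  let p : Nat := csScanB l1 t t.length 0
  if (p : Int) < n ∧ PySem.List.slice l1 (some ((p : Int) + 1)) none = PySem.List.slice t (some ((p : Int) + 1)) none then
    some (String.ofList (PySem.List.slice l1 none (some (p : Int)) ++ PySem.List.slice l1 (some ((p : Int) + 1)) none))
  else none

-- ===== PRECONDITION & SPEC =====
-- Pre_ excludes exactly the inputs where A raises IndexError on str2[i]: str2 shorter than str1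
-- with fewer than two mismatches among the first len(str2) positions (with two, A returns None first).
def Pre_common_section (str1 : String) (str2 : String) : Prop :=
  str1.toList.length ≤ str2.toList.length ∨
    ∃ j < str2.toList.length, ∃ i < j,
      str1.toList[i]? ≠ str2.toList[i]? ∧ str1.toList[j]? ≠ str2.toList[j]?
instance (str1 : String) (str2 : String) : Decidable (Pre_common_section str1 str2) := by
  unfold Pre_common_section; infer_instance

def pvWitness_common_section : String × String := ("abcde", "abxde")

def Spec_common_section (str1 : String) (str2 : String) (out : Option String) : Prop := out = common_section_alt str1 str2
instance (str1 : String) (str2 : String) (out : Option String) : Decidable (Spec_common_section str1 str2 out) := by unfold Spec_common_section; infer_instance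

-- ===== CLAIM (what is proved, stated in full; the proofs are below) =====
def Claim_equal_common_section : Prop := ∀ (str1 : String) (str2 : String), Dom_common_section str1 str2 → Pre_common_section str1 str2 → Spec_common_section str1 str2 (common_section str1 str2)

-- ===== LEMMAS AND PROOFS =====

-- The slice-join both Pythons build at a single difference position d (proof-side abbreviation).
def csJoin (l1 : List Char) (d : Int) : Option String :=
  some (String.ofList (PySem.List.slice l1 none (some d) ++ PySem.List.slice l1 (some (d + 1)) none))

-- If a mismatch exists at or after k, the scan stops strictly before t.length.
lemma csScanB_lt (l1 t : List Char) :
    ∀ (fuel k : Nat), t.length - k ≤ fuel →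
    (∃ j, k ≤ j ∧ j < t.length ∧ l1[j]? ≠ t[j]?) → csScanB l1 t fuel k < t.length := by
  intro fuel
  induction fuel with
  | zero =>
      intro k hf ⟨j, hkj, hjl, _⟩
      omega
  | succ n ih =>
      intro k hf ⟨j, hkj, hjl, hne⟩
      rw [csScanB]
      by_cases hc : k < t.length ∧ l1[k]? = t[k]?
      · rw [if_pos hc]
        have hjk : j ≠ k := by rintro rfl; exact hne hc.2
        exact ih (k + 1) (by omega) ⟨j, by omega, hjl, hne⟩
      · rw [if_neg hc]
        rcases Nat.lt_or_ge k t.length with h | h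
        · exact h
        · omega

-- Case len(str1) ≤ len(str2): A's scan from position k with sentinel dp equals B's
-- prefix-scan/suffix-test decomposition on the remaining range.
lemma case1 (l1 l2 t : List Char) (ht : t = l2.take l1.length) (h : l1.length ≤ l2.length) :
    ∀ (fuel k : Nat) (dp : Int), l1.length - k ≤ fuel → k ≤ l1.length →
    csLoopA l2 l1 (PySem.List.enumerate (l1.drop k) (k : Int)) dp =
      if dp > -1 then (if l1.drop k = t.drop k then csJoin l1 dp else none)
      else (if csScanB l1 t (t.length - k) k < l1.length ∧ l1.drop (csScanB l1 t (t.length - k) k + 1) = t.drop (csScanB l1 t (t.length - k) k + 1)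
            then csJoin l1 ((csScanB l1 t (t.length - k) k : Nat) : Int) else none) := by
  have htlen : t.length = l1.length := by rw [ht]; simp [Nat.min_eq_left h]
  have hdt : t.drop l1.length = [] := by rw [← htlen]; simp
  have base : ∀ dp : Int,
      csLoopA l2 l1 (PySem.List.enumerate (l1.drop l1.length) ((l1.length : Nat) : Int)) dp =
      if dp > -1 then (if l1.drop l1.length = t.drop l1.length then csJoin l1 dp else none)
      else (if csScanB l1 t (t.length - l1.length) l1.length < l1.length ∧
              l1.drop (csScanB l1 t (t.length - l1.length) l1.length + 1) = t.drop (csScanB l1 t (t.length - l1.length) l1.length + 1)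
            then csJoin l1 ((csScanB l1 t (t.length - l1.length) l1.length : Nat) : Int) else none) := by
    intro dp
    have hscan : csScanB l1 t (t.length - l1.length) l1.length = l1.length := by
      rw [htlen, Nat.sub_self, csScanB]
    rw [List.drop_eq_nil_of_le le_rfl, PySem.List.enumerate_nil, hscan]
    by_cases hdp : dp > -1
    · simp [csLoopA, hdp, hdt, csJoin]
    · simp [csLoopA, hdp]
  intro fuel
  induction fuel with
  | zero =>
      intro k dp hf hk
      have hk' : k = l1.length := by omega
      subst hk'
      exact base dp
  | succ n ih =>
      intro k dp hf hk
      by_cases hklt : k < l1.length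
      · have hk2 : k < l2.length := lt_of_lt_of_le hklt h
        have hkt : k < t.length := by omega
        conv_lhs => rw [List.drop_eq_getElem_cons hklt, PySem.List.enumerate_cons]
        have h2 : PySem.List.pyGet? l2 (k : Int) = some l2[k] := by
          simp [List.getElem?_eq_getElem hk2]
        have htk : t[k]? = l2[k]? := by rw [ht]; exact List.getElem?_take_of_lt hklt
        have hs : ((k : Int) + 1) = ((k + 1 : Nat) : Int) := by push_cast; ring
        by_cases hc : l1[k] = l2[k]
        · -- equal chars: A keeps dp; B's scan steps past k; drop-equality peels the head
          have hteq : t[k] = l1[k] := by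
            have htk' : t[k]? = some l1[k] := by
              rw [htk, List.getElem?_eq_getElem hk2, hc]
            rw [List.getElem?_eq_getElem hkt] at htk'
            exact Option.some.inj htk'
          have hcond : k < t.length ∧ l1[k]? = t[k]? := by
            refine ⟨hkt, ?_⟩
            rw [List.getElem?_eq_getElem hklt, List.getElem?_eq_getElem hkt, hteq]
          have hsc : csScanB l1 t (t.length - k) k = csScanB l1 t (t.length - (k + 1)) (k + 1) := by
            have hfk : t.length - k = (t.length - (k + 1)) + 1 := by omega
            rw [hfk, csScanB, if_pos hcond]
          have hdropeq : (l1.drop (k + 1) = t.drop (k + 1)) ↔ (l1.drop k = t.drop k) := by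
            constructor
            · intro hh
              rw [List.drop_eq_getElem_cons hklt, List.drop_eq_getElem_cons hkt, hteq, hh]
            · intro hh
              have hh2 := congrArg List.tail hh
              simpa [List.tail_drop] using hh2
          rw [csLoopA, h2]
          simp only [hc, ne_eq, not_true_eq_false, ite_false]
          rw [hsc, hs, ih (k + 1) dp (by omega) (by omega)]
          by_cases hdp : dp > -1
          · simp only [hdp, if_true]
            exact if_congr hdropeq rfl rfl
          · simp only [hdp, if_false]
        · -- first/second difference at k
          have hne? : l1[k]? ≠ t[k]? := by
            rw [htk, List.getElem?_eq_getElem hklt, List.getElem?_eq_getElem hk2]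
            simp [hc]
          rw [csLoopA, h2]
          simp only [hc, ne_eq, not_false_eq_true, ite_true]
          by_cases hdp : dp > -1
          · -- second difference: A returns None; tails differ at the head
            simp only [hdp, if_true]
            have hne : l1.drop k ≠ t.drop k := by
              rw [List.drop_eq_getElem_cons hklt, List.drop_eq_getElem_cons hkt]
              intro hh
              have hh1 := (List.cons.injEq _ _ _ _ ▸ hh).1
              apply hne?
              rw [List.getElem?_eq_getElem hklt, List.getElem?_eq_getElem hkt, hh1]
            rw [if_neg hne]
          · -- first difference: A continues with dp := k; B's scan stops at k
            simp only [hdp, if_false]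
            have hsc : csScanB l1 t (t.length - k) k = k := by
              have hfk : t.length - k = (t.length - (k + 1)) + 1 := by omega
              rw [hfk, csScanB, if_neg (by intro hh; exact hne? hh.2)]
            rw [hsc, hs, ih (k + 1) (k : Int) (by omega) (by omega)]
            have hkpos : ((k : Int)) > -1 := by omega
            simp only [hkpos, if_true]
            simp [hklt]
      · have hk' : k = l1.length := by omega
        subst hk'
        exact base dp

-- Case str2 shorter, sentinel already set: a remaining mismatch below both lengths forces None.
lemma case2a (l1 l2 : List Char) :
    ∀ (fuel k : Nat) (dp : Int), dp > -1 → l2.length - k ≤ fuel →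
    (∃ j, k ≤ j ∧ j < l2.length ∧ j < l1.length ∧ l1[j]? ≠ l2[j]?) →
    csLoopA l2 l1 (PySem.List.enumerate (l1.drop k) (k : Int)) dp = none := by
  intro fuel
  induction fuel with
  | zero =>
      intro k dp _ hf ⟨j, hkj, hjl, _, _⟩; omega
  | succ n ih =>
      intro k dp hdp hf ⟨j, hkj, hj2, hj1, hne⟩
      have hk1 : k < l1.length := by omega
      have hk2 : k < l2.length := by omega
      rw [List.drop_eq_getElem_cons hk1, PySem.List.enumerate_cons]
      have h2 : PySem.List.pyGet? l2 (k : Int) = some l2[k] := by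
        simp [List.getElem?_eq_getElem hk2]
      have hs : ((k : Int) + 1) = ((k + 1 : Nat) : Int) := by push_cast; ring
      rw [csLoopA, h2]
      by_cases hc : l1[k] = l2[k]
      · simp only [hc, ne_eq, not_true_eq_false, ite_false]
        have hjk : j ≠ k := by
          rintro rfl
          exact hne (by rw [List.getElem?_eq_getElem hj1, List.getElem?_eq_getElem hj2, hc])
        rw [hs]
        exact ih (k + 1) dp hdp (by omega) ⟨j, by omega, hj2, hj1, hne⟩
      · simp [hc, hdp]

-- Case str2 shorter, sentinel unset: two remaining mismatches force None.
lemma case2b (l1 l2 : List Char) :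
    ∀ (fuel k : Nat), l2.length - k ≤ fuel →
    (∃ j, j < l2.length ∧ j < l1.length ∧ ∃ i, k ≤ i ∧ i < j ∧ l1[i]? ≠ l2[i]? ∧ l1[j]? ≠ l2[j]?) →
    csLoopA l2 l1 (PySem.List.enumerate (l1.drop k) (k : Int)) (-1) = none := by
  intro fuel
  induction fuel with
  | zero =>
      intro k hf ⟨j, hj2, _, i, hki, hij, _, _⟩; omega
  | succ n ih =>
      intro k hf ⟨j, hj2, hj1, i, hki, hij, hnei, hnej⟩
      have hk1 : k < l1.length := by omega
      have hk2 : k < l2.length := by omega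
      rw [List.drop_eq_getElem_cons hk1, PySem.List.enumerate_cons]
      have h2 : PySem.List.pyGet? l2 (k : Int) = some l2[k] := by
        simp [List.getElem?_eq_getElem hk2]
      have hs : ((k : Int) + 1) = ((k + 1 : Nat) : Int) := by push_cast; ring
      rw [csLoopA, h2]
      by_cases hc : l1[k] = l2[k]
      · simp only [hc, ne_eq, not_true_eq_false, ite_false]
        have hik : i ≠ k := by
          rintro rfl
          exact hnei (by rw [List.getElem?_eq_getElem hk1, List.getElem?_eq_getElem hk2, hc])
        rw [hs]
        exact ih (k + 1) (by omega) ⟨j, hj2, hj1, i, by omega, hij, hnei, hnej⟩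
      · simp only [hc, ne_eq, not_false_eq_true, ite_true]
        have : ¬ ((-1 : Int) > -1) := by omega
        rw [if_neg this, hs]
        exact case2a l1 l2 (l2.length - (k + 1)) (k + 1) (k : Int) (by omega) (le_refl _)
          ⟨j, by omega, hj2, hj1, hnej⟩

-- Rewrites B's port into the drop/take form the lemmas use.
lemma alt_eq (str1 str2 : String) :
    common_section_alt str1 str2 =
      (let l1 := str1.toList
       let t := str2.toList.take l1.length
       let p := csScanB l1 t t.length 0
       if p < l1.length ∧ l1.drop (p + 1) = t.drop (p + 1) then csJoin l1 (p : Int) else none) := by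
  unfold common_section_alt csJoin
  simp only [PySem.List.len_eq]
  rw [PySem.List.slice_to_natCast]
  have hs : ∀ p : Nat, ((p : Int) + 1) = ((p + 1 : Nat) : Int) := by intro p; push_cast; ring
  rw [hs, PySem.List.slice_from_natCast, PySem.List.slice_from_natCast]
  have hlt : ∀ p : Nat, ((p : Int) < (str1.toList.length : Int)) ↔ p < str1.toList.length := by
    intro p; exact_mod_cast Iff.rfl
  simp only [hlt]

-- ===== VERDICT (by name: the statement is the Claim_ definition above) =====
theorem common_section_spec : Claim_equal_common_section := by
  intro str1 str2 _ hpre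
  unfold Spec_common_section common_section
  rw [alt_eq]
  simp only []
  have h0 : PySem.List.enumerate str1.toList 0
      = PySem.List.enumerate (str1.toList.drop 0) ((0 : Nat) : Int) := by simp
  rw [h0]
  by_cases hle : str1.toList.length ≤ str2.toList.length
  · -- len1 ≤ len2: the full equivalence lemma
    have hteq : (str2.toList.take str1.toList.length).length = str1.toList.length := by
      rw [List.length_take, Nat.min_eq_left hle]
    rw [case1 str1.toList str2.toList (str2.toList.take str1.toList.length) rfl hle
        str1.toList.length 0 (-1) (by omega) (by omega)]
    rw [Nat.sub_zero, hteq]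
    norm_num
  · -- len2 < len1: Pre_ provides two mismatches below len2; both sides are none
    have hgt : str2.toList.length < str1.toList.length := by omega
    rcases hpre with hle | ⟨j, hj2, i, hij, hnei, hnej⟩
    · omega
    have hj1 : j < str1.toList.length := by omega
    rw [case2b str1.toList str2.toList str2.toList.length 0 (by omega)
        ⟨j, hj2, hj1, i, by omega, hij, hnei, hnej⟩]
    -- B side: the suffix test fails because the tails have different lengths
    have htlen : (str2.toList.take str1.toList.length).length = str2.toList.length := by
      rw [List.length_take, Nat.min_eq_right hgt.le]
    have hmm : ∃ k, 0 ≤ k ∧ k < (str2.toList.take str1.toList.length).length ∧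
        str1.toList[k]? ≠ (str2.toList.take str1.toList.length)[k]? := by
      refine ⟨j, by omega, by omega, ?_⟩
      rwa [List.getElem?_take_of_lt hj1]
    have hp := csScanB_lt str1.toList (str2.toList.take str1.toList.length)
      (str2.toList.take str1.toList.length).length 0 (by omega) hmm
    set p := csScanB str1.toList (str2.toList.take str1.toList.length)
      (str2.toList.take str1.toList.length).length 0 with hpdef
    have hplen : p < str2.toList.length := by omega
    have hdropne : str1.toList.drop (p + 1) ≠ (str2.toList.take str1.toList.length).drop (p + 1) := by
      intro hh
      have hlen := congrArg List.length hh
      rw [List.length_drop, List.length_drop, htlen] at hlen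
      omega
    rw [if_neg (by intro hh; exact hdropne hh.2)]
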